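-- pv_equiv track=rewrite | github.com/yashkhasbage25/Quode-IDE | Quode.py | notAlphaLine
-- ===== SOURCE A (Python) =====
-- def notAlphaLine(line):
--
--     new_line = []
--     line = ''.join(line)
--     for char in line:
--         if (char == ' ' or char == '\t'):
--             new_line.append(char)
--         else:
--             return new_line
--     return new_line
-- ===== SOURCE B (Python) =====
-- def notAlphaLine(line):
--     line = ''.join(line)
--     stripped = line.lstrip(' \t')
--     return list(line[:len(line) - len(stripped)])
-- ===== Notes on version B (the rewrite author's own statement) =====
-- stated objective: simpler
-- what changed: Replaces the explicit char-by-char loop with early return by lstrip(' \t') to find the whitespace-prefix length and a single slice returning it as a list.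
import Mathlib
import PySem

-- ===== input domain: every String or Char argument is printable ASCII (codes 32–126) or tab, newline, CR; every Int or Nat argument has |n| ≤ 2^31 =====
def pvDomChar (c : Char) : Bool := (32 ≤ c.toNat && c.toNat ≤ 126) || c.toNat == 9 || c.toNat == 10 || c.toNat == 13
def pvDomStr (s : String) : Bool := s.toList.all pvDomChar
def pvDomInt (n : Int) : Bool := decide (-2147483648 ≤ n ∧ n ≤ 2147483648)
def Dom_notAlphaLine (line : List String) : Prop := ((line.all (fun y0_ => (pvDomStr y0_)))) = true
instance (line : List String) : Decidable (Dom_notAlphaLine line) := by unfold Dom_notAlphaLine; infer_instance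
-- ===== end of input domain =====

-- B finds the whitespace prefix via lstrip(' \t') and a slice instead of A's char loop with early return; objective: simpler.


-- ===== PORT A =====
-- the 'for char in line: if char in ' \t': append else return' loop, with early return
def pvGoA : List Char → List String → List String
  | [], acc => acc
  | c :: rest, acc =>
      if c = ' ' ∨ c = '\t' then pvGoA rest (acc ++ [String.mk [c]]) else acc

def notAlphaLine (line : List String) : List String :=
  pvGoA (PySem.Chars.join [] (line.map String.toList)) []  -- line = ''.join(line)

-- ===== PORT B =====
def notAlphaLine_alt (line : List String) : List String :=
  let cs := PySem.Chars.join [] (line.map String.toList)          -- line = ''.join(line)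
  let stripped := cs.dropWhile (fun c => c == ' ' || c == '\t')   -- line.lstrip(' \t'): exact, drops the leading run of ' '/'\t'
  (cs.take (cs.length - stripped.length)).map (fun c => String.mk [c])  -- list(line[:n])

-- ===== PRECONDITION & SPEC =====
def Spec_notAlphaLine (line : List String) (out : List String) : Prop := out = notAlphaLine_alt line
instance (line : List String) (out : List String) : Decidable (Spec_notAlphaLine line out) := by unfold Spec_notAlphaLine; infer_instance

-- ===== CLAIM (what is proved, stated in full; the proofs are below) =====
def Claim_equal_notAlphaLine : Prop := ∀ (line : List String), Dom_notAlphaLine line → Spec_notAlphaLine line (notAlphaLine line)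

-- ===== LEMMAS AND PROOFS =====
lemma pvGoA_eq (cs : List Char) (acc : List String) :
    pvGoA cs acc = acc ++ (cs.takeWhile (fun c => c == ' ' || c == '\t')).map (fun c => String.mk [c]) := by
  induction cs generalizing acc with
  | nil => simp [pvGoA]
  | cons c rest ih =>
    by_cases h : c = ' ' ∨ c = '\t'
    · have hb : (c == ' ' || c == '\t') = true := by rcases h with h | h <;> simp [h]
      simp [pvGoA, h, hb, ih]
    · have hb : (c == ' ' || c == '\t') = false := by
        rcases not_or.mp h with ⟨h1, h2⟩; simp [h1, h2]
      simp [pvGoA, h, hb]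

lemma take_sub_dropWhile (p : Char → Bool) (cs : List Char) :
    cs.take (cs.length - (cs.dropWhile p).length) = cs.takeWhile p := by
  have hlen : (cs.takeWhile p).length + (cs.dropWhile p).length = cs.length := by
    have := List.takeWhile_append_dropWhile (p := p) (l := cs)
    calc (cs.takeWhile p).length + (cs.dropWhile p).length
        = (cs.takeWhile p ++ cs.dropWhile p).length := (List.length_append).symm
      _ = cs.length := by rw [this]
  have hn : cs.length - (cs.dropWhile p).length = (cs.takeWhile p).length := by omega
  rw [hn]
  exact ((List.prefix_iff_eq_take).mp (List.takeWhile_prefix p)).symm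

-- ===== VERDICT (by name: the statement is the Claim_ definition above) =====
theorem notAlphaLine_spec : Claim_equal_notAlphaLine := by
  intro line _
  unfold Spec_notAlphaLine notAlphaLine notAlphaLine_alt
  simp only [pvGoA_eq, take_sub_dropWhile, List.nil_append]
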